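-- pv_equiv track=rewrite | github.com/pypi-data/pypi-mirror-403 | packages/udpbus/udpbus-0.4.0.tar.gz/udpbus-0.4.0/udpbus/__init__.py | _simple_wildcard_match
-- ===== SOURCE A (Python) =====
-- def _simple_wildcard_match(topic: str, pattern: str) -> bool:
--     """Simple * wildcard matching - efficient for ESP32"""
--     if pattern == "*":
--         return "/" not in topic  # Match single-level topics only
--
--     # Split by / and match each level
--     topic_parts = topic.split("/")
--     pattern_parts = pattern.split("/")
--
--     if len(topic_parts) != len(pattern_parts):
--         return False
--
--     for topic_part, pattern_part in zip(topic_parts, pattern_parts):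
--         if pattern_part == "*":
--             continue  # * matches anything
--         if pattern_part != topic_part:
--             return False
--
--     return True
-- ===== SOURCE B (Python) =====
-- def _simple_wildcard_match(topic: str, pattern: str) -> bool:
--     """Character-level state machine: one pass over the two strings, no splitting,
--     no intermediate lists.  at_start tracks whether we are at the start of a segment,
--     so '*' is a wildcard only when it is a whole segment."""
--     t, p = topic, pattern
--     at_start = True
--     while True:
--         if at_start and p[:1] == "*" and (len(p) == 1 or p[1] == "/"):
--             # wildcard segment: skip the current topic segment
--             i = 0
--             while i < len(t) and t[i] != "/":
--                 i += 1
--             if len(p) == 1: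
--                 return i == len(t)          # last pattern segment: topic must end too
--             if i == len(t):
--                 return False                # pattern has more segments, topic does not
--             t, p = t[i + 1:], p[2:]
--             at_start = True
--             continue
--         tc, pc = t[:1], p[:1]
--         if pc == "/" or tc == "/":
--             if pc != tc:
--                 return False
--             t, p = t[1:], p[1:]
--             at_start = True
--             continue
--         if not p or not t:
--             return (not p) and (not t)
--         if tc != pc:
--             return False
--         t, p = t[1:], p[1:]
--         at_start = False
-- ===== Notes on version B (the rewrite author's own statement) =====
-- stated objective: alternative
-- what changed: A splits both strings into segment lists and compares them pairwise with zip; B is a single character-level state machine that walks the two strings in one pass (an at_start flag makes '*' a wildcard only when it is a whole segment), building no intermediate lists.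
import Mathlib
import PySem

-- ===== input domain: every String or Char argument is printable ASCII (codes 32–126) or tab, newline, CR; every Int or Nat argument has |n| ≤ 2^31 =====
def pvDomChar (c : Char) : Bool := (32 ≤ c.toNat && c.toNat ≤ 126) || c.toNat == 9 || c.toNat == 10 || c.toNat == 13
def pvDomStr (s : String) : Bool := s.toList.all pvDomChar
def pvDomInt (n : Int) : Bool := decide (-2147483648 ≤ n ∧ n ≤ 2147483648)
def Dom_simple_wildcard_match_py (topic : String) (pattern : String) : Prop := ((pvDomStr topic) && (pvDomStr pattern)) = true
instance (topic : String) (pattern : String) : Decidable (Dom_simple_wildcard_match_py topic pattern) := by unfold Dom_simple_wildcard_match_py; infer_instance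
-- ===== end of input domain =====

-- B replaces A's split-into-segment-lists + zip comparison by a single character-level
-- state machine over the two strings (objective: alternative; no intermediate lists).

-- ===== PORT A =====
-- the for-loop over zip(topic_parts, pattern_parts) with early return False
def pyAZipLoop : List (List Char × List Char) → Bool
  | [] => true
  | (topic_part, pattern_part) :: rest =>
    if pattern_part = ['*'] then pyAZipLoop rest
    else if pattern_part ≠ topic_part then false
    else pyAZipLoop rest

def simple_wildcard_match_py (topic : String) (pattern : String) : Bool :=
  if pattern == "*" then !(PySem.Str.isIn "/" topic)
  else
    let topic_parts := PySem.Chars.splitOn topic.toList ['/']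
    let pattern_parts := PySem.Chars.splitOn pattern.toList ['/']
    if topic_parts.length ≠ pattern_parts.length then false
    else pyAZipLoop (topic_parts.zip pattern_parts)

-- ===== PORT B =====
-- the while-loop of Source B: state (t, p, at_start); the inner index loop that skips the
-- current topic segment is List.dropWhile (exactly that while loop)
def altGo (t p : List Char) (atStart : Bool) : Bool :=
  if h : atStart = true ∧ p.take 1 = ['*'] ∧ (p.length = 1 ∨ p[1]? = some '/') then
    let t' := t.dropWhile (· ≠ '/')
    if p.length = 1 then decide (t' = [])
    else
      match t' with
      | [] => false
      | _ :: t₁ => altGo t₁ (p.drop 2) true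
  else
    -- in Python: tc, pc = t[:1], p[:1]; the separator test, then the emptiness test,
    -- then the literal-character test (empty cases collapse to the same outcomes)
    match t, p with
    | [], [] => true
    | [], _ :: _ => false
    | _ :: _, [] => false
    | tc :: t₁, pc :: p₁ =>
      if pc = '/' ∨ tc = '/' then
        if pc ≠ tc then false else altGo t₁ p₁ true
      else if tc ≠ pc then false else altGo t₁ p₁ false
termination_by p.length
decreasing_by
  · have hp : p ≠ [] := by
      intro e; rw [e] at h; simp at h
    cases p with
    | nil => exact absurd rfl hp
    | cons a q => simp
  · simp
  · simp

def simple_wildcard_match_py_alt (topic : String) (pattern : String) : Bool :=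
  altGo topic.toList pattern.toList true

-- ===== PRECONDITION & SPEC =====
def Spec_simple_wildcard_match_py (topic : String) (pattern : String) (out : Bool) : Prop := out = simple_wildcard_match_py_alt topic pattern
instance (topic : String) (pattern : String) (out : Bool) : Decidable (Spec_simple_wildcard_match_py topic pattern out) := by unfold Spec_simple_wildcard_match_py; infer_instance

-- ===== CLAIM (what is proved, stated in full; the proofs are below) =====
def Claim_equal_simple_wildcard_match_py : Prop := ∀ (topic : String) (pattern : String), Dom_simple_wildcard_match_py topic pattern → Spec_simple_wildcard_match_py topic pattern (simple_wildcard_match_py topic pattern)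

-- ===== LEMMAS AND PROOFS =====

-- reference splitter: split a char list on '/'
def mySplit : List Char → List (List Char)
  | [] => [[]]
  | c :: rest =>
    if c = '/' then [] :: mySplit rest
    else (c :: (mySplit rest).headI) :: (mySplit rest).tail

-- everything after the first segment
def restSplit (l : List Char) : List (List Char) :=
  match l.dropWhile (· ≠ '/') with
  | [] => []
  | _ :: r => mySplit r

-- reference matcher on segment lists ('*' segment is a wildcard)
def matchSegs : List (List Char) → List (List Char) → Bool
  | [], [] => true
  | [], _ :: _ => false
  | _ :: _, [] => false
  | t :: ts, p :: ps => (if p = ['*'] then true else decide (p = t)) && matchSegs ts ps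

-- same, but the FIRST pattern segment is taken literally (mid-segment state)
def matchSegs1 : List (List Char) → List (List Char) → Bool
  | [], [] => true
  | [], _ :: _ => false
  | _ :: _, [] => false
  | t :: ts, p :: ps => decide (p = t) && matchSegs ts ps

lemma mySplit_ne_nil (l : List Char) : mySplit l ≠ [] := by
  cases l <;> simp [mySplit] <;> split <;> simp

lemma mySplit_headI_tail (l : List Char) :
    (mySplit l).headI :: (mySplit l).tail = mySplit l := by
  cases h : mySplit l with
  | nil => exact absurd h (mySplit_ne_nil l)
  | cons a r => simp

lemma mySplit_decomp (l : List Char) :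
    mySplit l = l.takeWhile (· ≠ '/') :: restSplit l := by
  induction l with
  | nil => simp [mySplit, restSplit]
  | cons c rest ih =>
    by_cases hc : c = '/'
    · subst hc; simp [mySplit, restSplit]
    · simp [mySplit, hc, restSplit, ih]

lemma go_spec : ∀ (fuel : Nat) (l cur acc : _), l.length ≤ fuel →
    PySem.Chars.splitOn.go ['/'] fuel l cur acc
      = acc.reverse ++ ((cur.reverse ++ (mySplit l).headI) :: (mySplit l).tail) := by
  intro fuel
  induction fuel with
  | zero =>
    intro l cur acc hl
    have : l = [] := List.length_eq_zero_iff.mp (Nat.le_zero.mp hl)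
    subst this
    simp [PySem.Chars.splitOn.go, mySplit]
  | succ fuel ih =>
    intro l cur acc hl
    cases l with
    | nil => simp [PySem.Chars.splitOn.go, mySplit]
    | cons c rest =>
      by_cases hc : c = '/'
      · subst hc
        rw [PySem.Chars.splitOn.go]
        simp only [List.isPrefixOf]
        simp [ih rest _ _ (by simpa using Nat.le_of_succ_le_succ hl), mySplit,
          mySplit_headI_tail]
      · rw [PySem.Chars.splitOn.go]
        have : (['/'].isPrefixOf (c :: rest)) = false := by
          simp [List.isPrefixOf]; exact fun h => absurd h.symm hc
        rw [this]
        simp [ih rest _ _ (by simpa using Nat.le_of_succ_le_succ hl), mySplit, hc]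

lemma splitOn_eq_mySplit (l : List Char) : PySem.Chars.splitOn l ['/'] = mySplit l := by
  rw [PySem.Chars.splitOn, go_spec (l.length + 1) l [] [] (by omega)]
  simp [mySplit_headI_tail]

lemma zip_matchSegs : ∀ (ts ps : List (List Char)),
    (if ts.length ≠ ps.length then false else pyAZipLoop (ts.zip ps)) = matchSegs ts ps := by
  intro ts
  induction ts with
  | nil => intro ps; cases ps <;> simp [pyAZipLoop, matchSegs]
  | cons t ts ih =>
    intro ps
    cases ps with
    | nil => simp [matchSegs]
    | cons p ps =>
      simp only [List.zip_cons_cons, List.length_cons, pyAZipLoop, matchSegs]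
      by_cases hw : p = ['*']
      · simp only [hw, if_pos rfl, if_pos rfl, Bool.true_and]
        rw [← ih ps]; simp
      · rw [if_neg hw, if_neg hw]
        by_cases he : p = t
        · simp only [he, ne_eq, not_true_eq_false, if_false, decide_eq_true_eq, if_pos rfl,
            Bool.true_and] -- placeholder
          rw [← ih ps]; simp
        · simp [he]

lemma infix_singleton_iff (a : Char) (l : List Char) : [a] <:+: l ↔ a ∈ l := by
  constructor
  · intro h; exact h.sublist.mem (by simp) -- placeholder
  · intro h
    obtain ⟨s, t, rfl⟩ := List.append_of_mem h
    exact ⟨s, t, by simp⟩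

lemma restSplit_eq_nil_iff (l : List Char) : restSplit l = [] ↔ '/' ∉ l := by
  unfold restSplit
  cases h : l.dropWhile (· ≠ '/') with
  | nil =>
    simp only [true_iff]
    have := List.dropWhile_eq_nil_iff.mp h
    intro hm
    have := this '/' hm
    simp at this
  | cons c r =>
    have hc : c = '/' := by
      have := List.head?_dropWhile_not (p := fun c => decide (c ≠ '/')) l
      rw [h] at this; simpa using this
    constructor
    · intro he; exact absurd he (mySplit_ne_nil r)
    · intro hm
      exfalso; apply hm
      have hsub : l.dropWhile (· ≠ '/') <:+ l := List.dropWhile_suffix _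
      have : c ∈ l := hsub.subset (by rw [h]; simp)
      rwa [hc] at this

lemma star_case (T : List Char) : matchSegs (mySplit T) [['*']] = !(PySem.Chars.isIn ['/'] T) := by
  rw [mySplit_decomp]
  cases h : restSplit T with
  | nil =>
    have : '/' ∉ T := (restSplit_eq_nil_iff T).mp h
    have hi : PySem.Chars.isIn ['/'] T = false := by
      rw [PySem.Chars.isIn_eq_false_iff, infix_singleton_iff]; exact this
    simp [matchSegs, hi]
  | cons s ss =>
    have : ¬ ('/' ∉ T) := by
      rw [← restSplit_eq_nil_iff, h]; simp
    have hi : PySem.Chars.isIn ['/'] T = true := by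
      rw [PySem.Chars.isIn_iff_infix, infix_singleton_iff]; exact not_not.mp this
    simp [matchSegs, hi]

lemma portA_eq (topic pattern : String) :
    simple_wildcard_match_py topic pattern
      = matchSegs (mySplit topic.toList) (mySplit pattern.toList) := by
  unfold simple_wildcard_match_py
  by_cases hs : pattern = "*"
  · subst hs
    rw [if_pos (by decide)]
    have : ("*" : String).toList = ['*'] := by decide
    rw [this]
    have hms : mySplit ['*'] = [['*']] := by decide
    rw [hms, star_case]
    congr 1
  · rw [if_neg (by simp [hs])]
    simp only [splitOn_eq_mySplit]
    exact zip_matchSegs _ _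

lemma matchSegs_nil_right (ts : List (List Char)) : matchSegs ts [] = decide (ts = []) := by
  cases ts <;> simp [matchSegs]

lemma matchSegs_nil_left (ps : List (List Char)) : matchSegs [] ps = decide (ps = []) := by
  cases ps <;> simp [matchSegs]

lemma mySplit_slash (l : List Char) : mySplit ('/' :: l) = [] :: mySplit l := by
  simp [mySplit]

lemma mySplit_cons_ne (c : Char) (l : List Char) (h : c ≠ '/') :
    mySplit (c :: l) = (c :: (mySplit l).headI) :: (mySplit l).tail := by
  simp [mySplit, h]

lemma takeWhile_ne_slash_nil (p : List Char) :
    p.takeWhile (· ≠ '/') = [] ↔ (p = [] ∨ p.head? = some '/') := by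
  cases p with
  | nil => simp
  | cons c q =>
    by_cases hc : c = '/' <;> simp [hc]

lemma segEq_star_iff (pc : Char) (p₁ : List Char) :
    (pc :: p₁).takeWhile (· ≠ '/') = ['*'] ↔
      (pc = '*' ∧ (p₁ = [] ∨ p₁.head? = some '/')) := by
  by_cases hc : pc = '/'
  · subst hc; simp [List.takeWhile_cons]
  · rw [List.takeWhile_cons, if_pos (by simpa using hc)]
    constructor
    · intro h
      have h1 : pc = '*' := by injection h
      have h2 : p₁.takeWhile (· ≠ '/') = [] := by injection h
      exact ⟨h1, (takeWhile_ne_slash_nil p₁).mp h2⟩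
    · rintro ⟨rfl, h2⟩
      rw [(takeWhile_ne_slash_nil p₁).mpr h2]

-- with ¬wildcard-condition the two states run the same code (the else branch ignores atStart)
lemma altGo_true_eq_false (t p : List Char)
    (h : ¬(p.take 1 = ['*'] ∧ (p.length = 1 ∨ p[1]? = some '/'))) :
    altGo t p true = altGo t p false := by
  rw [altGo, altGo]
  rw [dif_neg (by intro hc; exact h ⟨hc.2.1, hc.2.2⟩), dif_neg (by simp)]
  cases t <;> cases p <;> rfl

lemma altGo_nil_pat (t : List Char) (b : Bool) :
    altGo t [] b = matchSegs (mySplit t) [[]] ∧ altGo t [] b = matchSegs1 (mySplit t) [[]] := by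
  rw [altGo, dif_neg (by simp)]
  cases t with
  | nil => constructor <;> simp [mySplit, matchSegs, matchSegs1]
  | cons c t₁ =>
    by_cases hc : c = '/'
    · subst hc
      constructor <;>
        simp [mySplit_slash, matchSegs, matchSegs1, matchSegs_nil_right,
          mySplit_ne_nil]
    · constructor <;> simp [mySplit_cons_ne c t₁ hc, matchSegs, matchSegs1]

lemma altGo_spec : ∀ (n : Nat) (t p : List Char), p.length ≤ n →
    altGo t p true = matchSegs (mySplit t) (mySplit p) ∧
    altGo t p false = matchSegs1 (mySplit t) (mySplit p) := by
  intro n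
  induction n with
  | zero =>
    intro t p hp
    have : p = [] := List.length_eq_zero_iff.mp (Nat.le_zero.mp hp)
    subst this
    exact altGo_nil_pat t true |>.imp id (fun _ => (altGo_nil_pat t false).2)
  | succ n ih =>
    intro t p hp
    cases p with
    | nil => exact ⟨(altGo_nil_pat t true).1, (altGo_nil_pat t false).2⟩
    | cons pc p₁ =>
      -- the literal (non-wildcard) run, valid for the atStart := false state always
      have G2 : altGo t (pc :: p₁) false = matchSegs1 (mySplit t) (mySplit (pc :: p₁)) := by
        rw [altGo, dif_neg (by simp)]
        cases t with
        | nil =>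
          by_cases hc : pc = '/'
          · subst hc
            simp [mySplit, matchSegs1, matchSegs_nil_left, mySplit_ne_nil]
          · simp [mySplit, matchSegs1, hc]
        | cons tc t₁ =>
          show (if pc = '/' ∨ tc = '/' then (if pc ≠ tc then false else altGo t₁ p₁ true)
              else (if tc ≠ pc then false else altGo t₁ p₁ false))
            = matchSegs1 (mySplit (tc :: t₁)) (mySplit (pc :: p₁))
          by_cases hsep : pc = '/' ∨ tc = '/'
          · rw [if_pos hsep]
            by_cases heq : pc = tc
            · -- both are '/'
              have hpc : pc = '/' := by
                rcases hsep with h | h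
                · exact h
                · rw [heq, h]
              have htc : tc = '/' := heq ▸ hpc
              subst hpc; subst htc
              rw [if_neg (by simp)]
              rw [mySplit_slash, mySplit_slash]
              simp only [matchSegs1, decide_true, Bool.true_and]
              exact (ih t₁ p₁ (by simpa using hp)).1
            · rw [if_pos heq]
              rcases hsep with hpc | htc
              · subst hpc
                have htc : tc ≠ '/' := fun h => heq h.symm
                rw [mySplit_slash, mySplit_cons_ne tc t₁ htc]
                simp [matchSegs1]
              · subst htc
                have hpc : pc ≠ '/' := heq
                rw [mySplit_slash, mySplit_cons_ne pc p₁ hpc]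
                simp [matchSegs1]
          · rw [if_neg hsep]
            push_neg at hsep
            obtain ⟨hpc, htc⟩ := hsep
            rw [mySplit_cons_ne pc p₁ hpc, mySplit_cons_ne tc t₁ htc]
            by_cases heq : tc = pc
            · subst heq
              rw [if_neg (by simp)]
              have := (ih t₁ p₁ (by simpa using hp)).2
              rw [this, ← mySplit_headI_tail t₁, ← mySplit_headI_tail p₁]
              simp [matchSegs1]
            · rw [if_pos heq]
              have hne : (pc :: (mySplit p₁).headI) ≠ (tc :: (mySplit t₁).headI) := by
                intro h
                injection h with h1 _
                exact heq h1.symm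
              simp [matchSegs1, hne]
      refine ⟨?_, G2⟩
      by_cases hW : pc = '*' ∧ (p₁ = [] ∨ p₁.head? = some '/')
      · -- wildcard segment
        obtain ⟨rfl, hrest⟩ := hW
        have hseg : ('*' :: p₁).takeWhile (· ≠ '/') = ['*'] :=
          (segEq_star_iff '*' p₁).mpr ⟨rfl, hrest⟩
        have hdec := mySplit_decomp ('*' :: p₁)
        rw [hseg] at hdec
        rcases hrest with rfl | hh
        · -- pattern is exactly "*"
          rw [altGo, dif_pos ⟨rfl, by simp, Or.inl rfl⟩]
          rw [if_pos (by decide : (['*'] : List Char).length = 1)]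
          have : mySplit ['*'] = [['*']] := by decide
          rw [this, mySplit_decomp t]
          simp only [matchSegs, if_pos rfl, Bool.true_and, matchSegs_nil_right]
          unfold restSplit
          cases h : t.dropWhile (· ≠ '/') <;> simp [mySplit_ne_nil]
        · -- pattern is "*/..."
          cases p₁ with
          | nil => simp at hh
          | cons c p₃ =>
            have hc : c = '/' := by simpa using hh
            subst hc
            rw [altGo, dif_pos ⟨rfl, by simp, Or.inr (by simp)⟩,
              if_neg (by simp)]
            have hrp : restSplit ('*' :: '/' :: p₃) = mySplit p₃ := by
              unfold restSplit
              simp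
            rw [hdec, hrp, mySplit_decomp t]
            simp only [matchSegs]
            unfold restSplit
            cases h : t.dropWhile (· ≠ '/') with
            | nil =>
              rw [← mySplit_headI_tail p₃]
              simp [matchSegs]
            | cons c' t₁ =>
              have hlen : p₃.length ≤ n := by simp at hp; omega
              have := (ih t₁ p₃ hlen).1
              simpa using this
      · -- not a wildcard segment: state true behaves as state false
        have hcond : ¬((pc :: p₁).take 1 = ['*'] ∧
            ((pc :: p₁).length = 1 ∨ (pc :: p₁)[1]? = some '/')) := by
          intro ⟨h1, h2⟩
          apply hW
          refine ⟨by simpa using h1, ?_⟩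
          rcases h2 with h2 | h2
          · left; simpa using h2
          · right; simpa [List.head?_eq_getElem?] using h2
        rw [altGo_true_eq_false t _ hcond, G2]
        have hseg : (pc :: p₁).takeWhile (· ≠ '/') ≠ ['*'] :=
          fun h => hW ((segEq_star_iff pc p₁).mp h)
        rw [mySplit_decomp (pc :: p₁), mySplit_decomp t]
        simp at hseg
        simp [matchSegs, matchSegs1, hseg]

lemma portB_eq (topic pattern : String) :
    simple_wildcard_match_py_alt topic pattern
      = matchSegs (mySplit topic.toList) (mySplit pattern.toList) := by
  unfold simple_wildcard_match_py_alt
  exact (altGo_spec pattern.toList.length topic.toList pattern.toList le_rfl).1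

-- ===== VERDICT (by name: the statement is the Claim_ definition above) =====
theorem simple_wildcard_match_py_spec : Claim_equal_simple_wildcard_match_py := by
  intro topic pattern _
  unfold Spec_simple_wildcard_match_py
  rw [portA_eq, portB_eq]
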